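-- pv_equiv track=rewrite | github.com/mjd-x/PPV | otros/guia 0/ej09.py | ej09
-- ===== SOURCE A (Python) =====
-- def ej09(texto):
--     digito = 0
--     letra = 0
--     simbolo = 0
--     for leter in texto:
--         if leter.isdigit() == True:
--             digito += 1
--         elif leter.isalpha() == True:
--             letra += 1
--         else:
--             simbolo += 1
--     resultado = (letra, digito, simbolo)
--     return resultado
-- ===== SOURCE B (Python) =====
-- def ej09(texto):
--     digito = sum(1 for c in texto if c.isdigit())
--     letra = sum(1 for c in texto if c.isalpha())
--     simbolo = len(texto) - digito - letra
--     return (letra, digito, simbolo)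
-- ===== Notes on version B (the rewrite author's own statement) =====
-- stated objective: simpler
-- what changed: Replaces the single priority-ordered if/elif/else counting loop with independent filtered counts for digits and letters, deriving the symbol count as the complement len - digito - letra.
import Mathlib
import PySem

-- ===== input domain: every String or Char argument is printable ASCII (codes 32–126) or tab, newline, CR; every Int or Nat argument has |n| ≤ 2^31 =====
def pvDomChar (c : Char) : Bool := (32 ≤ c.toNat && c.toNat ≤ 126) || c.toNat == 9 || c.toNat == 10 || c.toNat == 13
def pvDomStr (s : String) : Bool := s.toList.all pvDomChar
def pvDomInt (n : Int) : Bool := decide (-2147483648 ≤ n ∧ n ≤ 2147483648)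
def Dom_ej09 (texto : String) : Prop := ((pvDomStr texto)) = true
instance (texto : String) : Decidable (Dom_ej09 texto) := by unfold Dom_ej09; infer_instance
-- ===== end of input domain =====

-- B replaces A's single priority-ordered if/elif/else loop with independent
-- filtered counts for digits and letters plus the complement for symbols (simpler decomposition).

-- ===== PORT A =====
-- one pass; state = (digito, letra, simbolo), branches in A's order
def ej09 (texto : String) : Int × Int × Int :=
  let st := texto.toList.foldl
    (fun (s : Int × Int × Int) leter =>
      if PySem.Chars.isdigit leter = true then (s.1 + 1, s.2.1, s.2.2)
      else if PySem.Chars.isalpha leter = true then (s.1, s.2.1 + 1, s.2.2)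
      else (s.1, s.2.1, s.2.2 + 1))
    (0, 0, 0)
  (st.2.1, st.1, st.2.2)

-- ===== PORT B =====
def ej09_alt (texto : String) : Int × Int × Int :=
  let digito : Int := (texto.toList.filter (fun c => PySem.Chars.isdigit c)).length
  let letra : Int := (texto.toList.filter (fun c => PySem.Chars.isalpha c)).length
  let simbolo : Int := (PySem.Str.len texto : Int) - digito - letra
  (letra, digito, simbolo)

-- ===== PRECONDITION & SPEC =====
def Spec_ej09 (texto : String) (out : Int × Int × Int) : Prop := out = ej09_alt texto
instance (texto : String) (out : Int × Int × Int) : Decidable (Spec_ej09 texto out) := by unfold Spec_ej09; infer_instance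

-- ===== CLAIM (what is proved, stated in full; the proofs are below) =====
def Claim_equal_ej09 : Prop := ∀ (texto : String), Dom_ej09 texto → Spec_ej09 texto (ej09 texto)

-- ===== LEMMAS AND PROOFS =====

-- no character is both a digit and a letter
theorem pv_digit_not_alpha (c : Char) (h : PySem.Chars.isdigit c = true) :
    PySem.Chars.isalpha c = false := by
  simp [PySem.Chars.isdigit, Char.le_def, UInt32.le_iff_toNat_le] at h
  simp [PySem.Chars.isalpha, PySem.Chars.isupper, PySem.Chars.islower, Char.le_def,
    UInt32.le_iff_toNat_le]
  omega

theorem pv_loop (xs : List Char) (d l s : Int) :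
    xs.foldl
      (fun (st : Int × Int × Int) leter =>
        if PySem.Chars.isdigit leter = true then (st.1 + 1, st.2.1, st.2.2)
        else if PySem.Chars.isalpha leter = true then (st.1, st.2.1 + 1, st.2.2)
        else (st.1, st.2.1, st.2.2 + 1)) (d, l, s)
    = (d + (xs.filter (fun c => PySem.Chars.isdigit c)).length,
       l + (xs.filter (fun c => PySem.Chars.isalpha c)).length,
       s + ((xs.length : Int)
            - (xs.filter (fun c => PySem.Chars.isdigit c)).length
            - (xs.filter (fun c => PySem.Chars.isalpha c)).length)) := by
  induction xs generalizing d l s with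
  | nil => simp
  | cons c xs ih =>
    by_cases hd : PySem.Chars.isdigit c = true
    · have ha := pv_digit_not_alpha c hd
      simp [hd, ha, ih]
      omega
    · by_cases ha : PySem.Chars.isalpha c = true
      · simp [hd, ha, ih]
        omega
      · simp [hd, ha, ih]
        omega

-- ===== VERDICT (by name: the statement is the Claim_ definition above) =====
theorem ej09_spec : Claim_equal_ej09 := by
  intro texto _
  unfold Spec_ej09 ej09 ej09_alt
  simp [pv_loop, PySem.Str.len]
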